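-- pv_equiv track=rewrite | github.com/holzhauerL/nlp-rule-extraction | src/modelling.py | streamline
-- ===== SOURCE A (Python) =====
-- def streamline(formatted_constraints):
--     """
--     Streamlines the constraints into the end format relevant for the Gold Standard comparison.
--
--     :param formatted_constraints: An array with the formatted constraints.
--     :return: The streamlined constraints in a dict.
--     """
--     streamlined = {}
--     counter = 1
--     nr_of_constraints = len(formatted_constraints)
--
--     for i in range(nr_of_constraints):
--
--         step = formatted_constraints[i][0]
--         constraint = formatted_constraints[i][1]
--
--         if i < nr_of_constraints - 1:
--             succeding_step = formatted_constraints[i + 1][0]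
--         else:
--             succeding_step = "END"
--         streamlined[f'c{counter}'] = "({" + step + "}, {" + succeding_step + "}, {directly follows}, {" + constraint + "})"
--         counter += 1
--
--     return streamlined
-- ===== SOURCE B (Python) =====
-- def streamline(formatted_constraints):
--     def fmt(pairs):
--         if not pairs:
--             return []
--         (step, constraint), rest = pairs[0], pairs[1:]
--         succ = rest[0][0] if rest else "END"
--         return ["({" + step + "}, {" + succ + "}, {directly follows}, {" + constraint + "})"] + fmt(rest)
--
--     return {f"c{i}": v for i, v in enumerate(fmt(formatted_constraints), start=1)}
-- ===== Notes on version B (the rewrite author's own statement) =====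
-- stated objective: alternative
-- what changed: Replaced A's single indexed loop with counter and index lookahead by a two-stage decomposition: a structural recursion on (head, rest) that builds the list of formatted strings (the successor read off the rest, no indices), followed by a separate enumerate-driven keying pass that assigns the c-counter keys.
import Mathlib
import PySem

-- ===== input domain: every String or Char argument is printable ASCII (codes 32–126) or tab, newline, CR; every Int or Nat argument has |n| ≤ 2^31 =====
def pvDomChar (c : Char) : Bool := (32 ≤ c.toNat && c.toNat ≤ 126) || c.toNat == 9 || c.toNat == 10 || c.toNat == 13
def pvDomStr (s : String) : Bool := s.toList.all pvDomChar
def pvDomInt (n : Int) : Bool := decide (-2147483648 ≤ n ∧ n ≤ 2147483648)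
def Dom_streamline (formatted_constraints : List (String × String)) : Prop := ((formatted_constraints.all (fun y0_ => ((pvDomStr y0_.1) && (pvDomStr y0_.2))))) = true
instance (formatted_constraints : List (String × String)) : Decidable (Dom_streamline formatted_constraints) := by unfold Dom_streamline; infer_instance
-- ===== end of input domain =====

-- B replaces A's indexed counter loop with lookahead by a structural recursion on (head, rest)
-- building the formatted values, followed by a separate enumerate keying pass; alternative decomposition, same cost.

-- ===== PORT A =====
-- literal port of A's indexed loop; pyGetD's default is never used (indices are in range)
def streamline (formatted_constraints : List (String × String)) : List (String × String) :=
  let n : Int := formatted_constraints.length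
  let res :=
    (PySem.List.pyRange 0 n 1).foldl
      (fun (st : PySem.Dict String String × Int) i =>
        let step := (PySem.List.pyGetD formatted_constraints i ("", "")).1
        let constraint := (PySem.List.pyGetD formatted_constraints i ("", "")).2
        let succeding_step :=
          if i < n - 1 then (PySem.List.pyGetD formatted_constraints (i + 1) ("", "")).1
          else "END"
        (st.1.insert ("c" ++ PySem.Int.toStr st.2)
          ("({" ++ step ++ "}, {" ++ succeding_step ++ "}, {directly follows}, {" ++ constraint ++ "})"),
         st.2 + 1))
      (PySem.Dict.empty, 1)
  res.1.items

-- ===== PORT B =====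
-- stage 1 of Source B: structural recursion building the formatted values, successor read off the rest
def streamlineFmt : List (String × String) → List String
  | [] => []
  | (step, constraint) :: rest =>
      let succ := match rest with
        | [] => "END"
        | (s, _) :: _ => s
      ("({" ++ step ++ "}, {" ++ succ ++ "}, {directly follows}, {" ++ constraint ++ "})")
        :: streamlineFmt rest

-- stage 2 of Source B: the keying dict comprehension over enumerate(…, 1)
def streamline_alt (formatted_constraints : List (String × String)) : List (String × String) :=
  ((PySem.List.enumerate (streamlineFmt formatted_constraints) 1).foldl
      (fun (d : PySem.Dict String String) p => d.insert ("c" ++ PySem.Int.toStr p.1) p.2)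
      PySem.Dict.empty).items

-- ===== PRECONDITION & SPEC =====
def Spec_streamline (formatted_constraints : List (String × String)) (out : List (String × String)) : Prop := out = streamline_alt formatted_constraints
instance (formatted_constraints : List (String × String)) (out : List (String × String)) : Decidable (Spec_streamline formatted_constraints out) := by unfold Spec_streamline; infer_instance

-- ===== CLAIM (what is proved, stated in full; the proofs are below) =====
def Claim_equal_streamline : Prop := ∀ (formatted_constraints : List (String × String)), Dom_streamline formatted_constraints → Spec_streamline formatted_constraints (streamline formatted_constraints)

-- ===== LEMMAS AND PROOFS =====

-- a fold that also threads a counter equals a fold over the enumerated list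
theorem pv_fold_counter {α : Type} (xs : List α) (d : PySem.Dict String String) (c : Int)
    (F : PySem.Dict String String → Int → α → PySem.Dict String String) :
    (xs.foldl (fun st x => (F st.1 st.2 x, st.2 + 1)) (d, c)).1
      = (PySem.List.enumerate xs c).foldl (fun d p => F d p.1 p.2) d := by
  induction xs generalizing d c with
  | nil => simp [PySem.List.enumerate_nil]
  | cons x xs ih => simp [PySem.List.enumerate_cons, ih]

theorem pv_fmt_length (fcs : List (String × String)) :
    (streamlineFmt fcs).length = fcs.length := by
  induction fcs with
  | nil => rfl
  | cons x xs ih => cases x; simp [streamlineFmt, ih]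

theorem pv_fmt_getElem (fcs : List (String × String)) (k : Nat) (hk : k < fcs.length) :
    (streamlineFmt fcs)[k]'(by rw [pv_fmt_length]; exact hk)
      = "({" ++ (fcs[k]'hk).1 ++ "}, {"
          ++ (if h : k + 1 < fcs.length then (fcs[k + 1]'h).1 else "END")
          ++ "}, {directly follows}, {" ++ (fcs[k]'hk).2 ++ "})" := by
  induction fcs generalizing k with
  | nil => simp at hk
  | cons x xs ih =>
    obtain ⟨step, constraint⟩ := x
    cases k with
    | zero =>
      cases xs with
      | nil => simp [streamlineFmt]
      | cons y ys => obtain ⟨s, t⟩ := y; simp [streamlineFmt]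
    | succ k =>
      have hk' : k < xs.length := by simpa using hk
      have := ih k hk'
      simp only [streamlineFmt, List.getElem_cons_succ]
      rw [this]
      simp only [List.length_cons]
      by_cases h : k + 1 < xs.length
      · rw [dif_pos h, dif_pos (by omega)]
      · rw [dif_neg h, dif_neg (by omega)]

-- the two insertion sequences are the same list of (key, value) pairs
theorem pv_pairs_eq (fcs : List (String × String)) :
    (PySem.List.enumerate (PySem.List.pyRange 0 (fcs.length : Int) 1) 1).map
        (fun p => ("c" ++ PySem.Int.toStr p.1,
          "({" ++ (PySem.List.pyGetD fcs p.2 ("", "")).1 ++ "}, {" ++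
            (if p.2 < (fcs.length : Int) - 1 then (PySem.List.pyGetD fcs (p.2 + 1) ("", "")).1 else "END")
            ++ "}, {directly follows}, {" ++ (PySem.List.pyGetD fcs p.2 ("", "")).2 ++ "})"))
      = (PySem.List.enumerate (streamlineFmt fcs) 1).map
        (fun p => ("c" ++ PySem.Int.toStr p.1, p.2)) := by
  apply List.ext_getElem
  · simp [PySem.List.length_enumerate, PySem.List.length_pyRange_one, pv_fmt_length]
  · intro k h1 h2
    have hk : k < fcs.length := by
      simp [PySem.List.length_enumerate, PySem.List.length_pyRange_one] at h1
      omega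
    simp only [List.getElem_map, PySem.List.getElem_enumerate]
    have hr : (PySem.List.pyRange 0 (fcs.length : Int) 1)[k]'(by
        simp [PySem.List.length_pyRange_one]; omega) = (0 : Int) + k :=
      PySem.List.getElem_pyRange_one ..
    rw [hr]
    simp only [zero_add]
    have hget : PySem.List.pyGetD fcs ((k : Nat) : Int) ("", "") = fcs[k]'hk := by
      rw [PySem.List.pyGetD_natCast]
      exact List.getD_eq_getElem _ _ hk
    have hfmt := pv_fmt_getElem fcs k hk
    rw [hget, hfmt]
    by_cases hc : (k : Int) < (fcs.length : Int) - 1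
    · have hk1 : k + 1 < fcs.length := by omega
      have hget1 : PySem.List.pyGetD fcs ((k : Nat) + 1 : Int) ("", "") = fcs[k + 1]'hk1 := by
        rw [show (((k : Nat) : Int) + 1) = (((k + 1 : Nat)) : Int) by push_cast; omega,
          PySem.List.pyGetD_natCast]
        exact List.getD_eq_getElem _ _ hk1
      rw [if_pos hc, hget1, dif_pos hk1]
    · rw [if_neg hc, dif_neg (by omega)]

-- ===== VERDICT (by name: the statement is the Claim_ definition above) =====
theorem streamline_spec : Claim_equal_streamline := by
  intro fcs _
  show streamline fcs = streamline_alt fcs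
  have hA : streamline fcs
      = ((PySem.List.enumerate (PySem.List.pyRange 0 (fcs.length : Int) 1) 1).foldl
          (fun (d : PySem.Dict String String) p => d.insert ("c" ++ PySem.Int.toStr p.1)
            ("({" ++ (PySem.List.pyGetD fcs p.2 ("", "")).1 ++ "}, {" ++
              (if p.2 < (fcs.length : Int) - 1 then (PySem.List.pyGetD fcs (p.2 + 1) ("", "")).1 else "END")
              ++ "}, {directly follows}, {" ++ (PySem.List.pyGetD fcs p.2 ("", "")).2 ++ "})"))
          PySem.Dict.empty).items :=
    congrArg PySem.Dict.items
      (pv_fold_counter (PySem.List.pyRange 0 (fcs.length : Int) 1) PySem.Dict.empty 1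
        (fun d c i => d.insert ("c" ++ PySem.Int.toStr c)
          ("({" ++ (PySem.List.pyGetD fcs i ("", "")).1 ++ "}, {" ++
            (if i < (fcs.length : Int) - 1 then (PySem.List.pyGetD fcs (i + 1) ("", "")).1 else "END")
            ++ "}, {directly follows}, {" ++ (PySem.List.pyGetD fcs i ("", "")).2 ++ "})")))
  have h1 :
      (PySem.List.enumerate (PySem.List.pyRange 0 (fcs.length : Int) 1) 1).foldl
        (fun (d : PySem.Dict String String) p => d.insert ("c" ++ PySem.Int.toStr p.1)
          ("({" ++ (PySem.List.pyGetD fcs p.2 ("", "")).1 ++ "}, {" ++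
            (if p.2 < (fcs.length : Int) - 1 then (PySem.List.pyGetD fcs (p.2 + 1) ("", "")).1 else "END")
            ++ "}, {directly follows}, {" ++ (PySem.List.pyGetD fcs p.2 ("", "")).2 ++ "})"))
        PySem.Dict.empty
      = ((PySem.List.enumerate (PySem.List.pyRange 0 (fcs.length : Int) 1) 1).map
          (fun p => ("c" ++ PySem.Int.toStr p.1,
            "({" ++ (PySem.List.pyGetD fcs p.2 ("", "")).1 ++ "}, {" ++
              (if p.2 < (fcs.length : Int) - 1 then (PySem.List.pyGetD fcs (p.2 + 1) ("", "")).1 else "END")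
              ++ "}, {directly follows}, {" ++ (PySem.List.pyGetD fcs p.2 ("", "")).2 ++ "})"))).foldl
          (fun (d : PySem.Dict String String) q => d.insert q.1 q.2) PySem.Dict.empty := by
    rw [List.foldl_map]
  have h2 : streamline_alt fcs
      = (((PySem.List.enumerate (streamlineFmt fcs) 1).map
          (fun (p : Int × String) => ("c" ++ PySem.Int.toStr p.1, p.2))).foldl
          (fun (d : PySem.Dict String String) (q : String × String) => d.insert q.1 q.2)
          PySem.Dict.empty).items := by
    unfold streamline_alt
    rw [List.foldl_map]
  rw [hA, h2]
  exact congrArg PySem.Dict.items (by rw [h1, pv_pairs_eq])
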